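-- pv_equiv track=rewrite | github.com/marcius-llmus/search-replace-py | search_replace/apply.py | replace_part_with_missing_leading_whitespace
-- ===== SOURCE A (Python) =====
-- def replace_part_with_missing_leading_whitespace(
--     whole_lines: list[str],
--     part_lines: list[str],
--     replace_lines: list[str],
-- ) -> str | None:
--     # GPT often messes up leading whitespace.
--     # It usually does it uniformly across the ORIG and UPD blocks.
--     # Either omitting all leading whitespace, or including only some of it.
--
--     # Outdent everything in part_lines and replace_lines by the max fixed amount possible.
--     leading = [len(p) - len(p.lstrip()) for p in part_lines if p.strip()] + [
--         len(p) - len(p.lstrip()) for p in replace_lines if p.strip()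
--     ]
--
--     if leading and min(leading):
--         num_leading = min(leading)
--         part_lines = [p[num_leading:] if p.strip() else p for p in part_lines]
--         replace_lines = [p[num_leading:] if p.strip() else p for p in replace_lines]
--
--     # Can we find an exact match not including the leading whitespace.
--     num_part_lines = len(part_lines)
--
--     for index in range(len(whole_lines) - num_part_lines + 1):
--         add_leading = match_but_for_leading_whitespace(
--             whole_lines[index : index + num_part_lines], part_lines
--         )
--
--         if add_leading is None:
--             continue
--
--         replace_lines = [add_leading + line if line.strip() else line for line in replace_lines]
--         whole_lines = whole_lines[:index] + replace_lines + whole_lines[index + num_part_lines :]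
--         return "".join(whole_lines)
--
--     return None
--
-- def match_but_for_leading_whitespace(whole_lines: list[str], part_lines: list[str]) -> str | None:
--     num = len(whole_lines)
--
--     # Does the non-whitespace all agree?
--     if not all(whole_lines[i].lstrip() == part_lines[i].lstrip() for i in range(num)):
--         return None
--
--     # Are they all offset the same?
--     add = set(
--         whole_lines[i][: len(whole_lines[i]) - len(part_lines[i])]
--         for i in range(num)
--         if whole_lines[i].strip()
--     )
--     if len(add) != 1:
--         return None
--
--     return add.pop()
-- ===== SOURCE B (Python) =====
-- def replace_part_with_missing_leading_whitespace(whole_lines, part_lines, replace_lines):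
--     # Rabin-Karp: roll a polynomial hash over the lstripped line sequence; only hash hits
--     # are verified (stripped equality + uniform leading-whitespace offset) and spliced.
--     lead = min((len(p) - len(p.lstrip()) for p in part_lines + replace_lines if p.strip()), default=0)
--     if lead > 0:
--         part_lines = [p[lead:] if p.strip() else p for p in part_lines]
--         replace_lines = [p[lead:] if p.strip() else p for p in replace_lines]
--
--     m = len(part_lines)
--     n = len(whole_lines)
--     if m == 0 or n < m:
--         return None
--
--     MOD = 2305843009213693951  # 2**61 - 1
--     BASE = 1000003
--
--     def line_hash(s):
--         h = 0
--         for ch in s: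
--             h = (h * 131 + ord(ch) + 1) % MOD
--         return h
--
--     pstrip = [p.lstrip() for p in part_lines]
--     wstrip = [w.lstrip() for w in whole_lines]
--     wh = [line_hash(s) for s in wstrip]
--
--     hp = 0
--     for s in pstrip:
--         hp = (hp * BASE + line_hash(s)) % MOD
--     pw = pow(BASE, m - 1, MOD)
--     h = 0
--     for x in wh[:m]:
--         h = (h * BASE + x) % MOD
--
--     for i in range(n - m + 1):
--         if h == hp and wstrip[i:i + m] == pstrip:
--             add = None
--             ok = True
--             for j in range(m):
--                 if wstrip[i + j]:
--                     w = whole_lines[i + j]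
--                     cand = w[: len(w) - len(part_lines[j])]
--                     if add is None:
--                         add = cand
--                     elif cand != add:
--                         ok = False
--                         break
--             if ok and add is not None:
--                 body = [add + r if r.strip() else r for r in replace_lines]
--                 return "".join(whole_lines[:i] + body + whole_lines[i + m:])
--         if i + m < n:
--             h = ((h - wh[i] * pw) * BASE + wh[i + m]) % MOD
--     return None
-- ===== Notes on version B (the rewrite author's own statement) =====
-- stated objective: alternative
-- what changed: B replaces A's naive scan (which slices out and re-lstrips an m-line window at every position) by Rabin-Karp matching: each line is lstripped and hashed once, a rolling polynomial hash over the line-hash sequence is compared against the pattern hash, and only hash hits are verified (stripped equality plus uniform leading-whitespace offset) and spliced.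
import Mathlib
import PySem

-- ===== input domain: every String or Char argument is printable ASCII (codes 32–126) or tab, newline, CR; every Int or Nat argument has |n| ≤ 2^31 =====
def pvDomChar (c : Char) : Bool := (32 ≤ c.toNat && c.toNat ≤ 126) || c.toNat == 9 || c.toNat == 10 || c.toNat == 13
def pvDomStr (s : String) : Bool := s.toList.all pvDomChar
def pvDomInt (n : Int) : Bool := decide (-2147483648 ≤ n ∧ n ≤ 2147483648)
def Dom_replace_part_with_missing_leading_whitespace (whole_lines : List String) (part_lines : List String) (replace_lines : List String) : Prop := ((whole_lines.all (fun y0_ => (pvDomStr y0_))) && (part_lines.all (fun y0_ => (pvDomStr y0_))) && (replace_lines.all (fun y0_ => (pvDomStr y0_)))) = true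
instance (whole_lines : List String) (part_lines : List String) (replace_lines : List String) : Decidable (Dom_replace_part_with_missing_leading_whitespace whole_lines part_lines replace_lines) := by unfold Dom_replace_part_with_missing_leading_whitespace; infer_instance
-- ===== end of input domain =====

-- B replaces A's per-window slicing-and-relstripping scan by Rabin-Karp: a rolling polynomial
-- hash over the once-lstripped line sequence gates which positions are verified and spliced.

-- ===== PORT A =====
-- shared with port B only where the Python source text of A and B is literally identical:
-- '[len(p) - len(p.lstrip()) for p in ls if p.strip()]',
-- '[p[num:] if p.strip() else p for p in ls]', '[add + l if l.strip() else l for l in ls]'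
def pvLeadVals (ls : List String) : List Int :=
  (ls.filter (fun p => decide (PySem.Str.strip p ≠ ""))).map
    (fun p => PySem.Str.len p - PySem.Str.len (PySem.Str.lstrip p))

def pvOutdent (num : Int) (ls : List String) : List String :=
  ls.map (fun p => if PySem.Str.strip p ≠ "" then PySem.Str.slice p (some num) none else p)

def pvAddLead (add : String) (ls : List String) : List String :=
  ls.map (fun line => if PySem.Str.strip line ≠ "" then add ++ line else line)

-- port of helper match_but_for_leading_whitespace (indexing is in range at every call site;
-- getD's default is never read there)
def pvMatchLead (whole_w : List String) (part : List String) : Option String :=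
  let num := whole_w.length
  if (List.range num).all (fun i =>
        decide (PySem.Str.lstrip (whole_w.getD i "") = PySem.Str.lstrip (part.getD i ""))) then
    let add : PySem.Set String := PySem.Set.ofList
      (((List.range num).filter (fun i => decide (PySem.Str.strip (whole_w.getD i "") ≠ ""))).map
        (fun i => PySem.Str.slice (whole_w.getD i "") none
          (some (PySem.Str.len (whole_w.getD i "") - PySem.Str.len (part.getD i "")))))
    if add.length = 1 then add[0]? else none
  else none

-- the 'for index in range(...)' loop with early return
def pvALoop (whole part repl : List String) (m : Int) : List Int → Option String
  | [] => none
  | i :: is =>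
    match pvMatchLead (PySem.List.slice whole (some i) (some (i + m))) part with
    | some add => some (PySem.Str.join ""
        (PySem.List.slice whole none (some i) ++ pvAddLead add repl ++
          PySem.List.slice whole (some (i + m)) none))
    | none => pvALoop whole part repl m is

def replace_part_with_missing_leading_whitespace (whole_lines : List String) (part_lines : List String) (replace_lines : List String) : Option String :=
  let leading := pvLeadVals part_lines ++ pvLeadVals replace_lines
  let part := if leading ≠ [] ∧ PySem.List.minD leading (fun x => x) 0 ≠ 0 then
      pvOutdent (PySem.List.minD leading (fun x => x) 0) part_lines else part_lines
  let repl := if leading ≠ [] ∧ PySem.List.minD leading (fun x => x) 0 ≠ 0 then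
      pvOutdent (PySem.List.minD leading (fun x => x) 0) replace_lines else replace_lines
  pvALoop whole_lines part repl (PySem.List.len part)
    (PySem.List.pyRange 0 (PySem.List.len whole_lines - PySem.List.len part + 1) 1)

-- ===== PORT B =====
-- MOD = 2**61 - 1 and the two hash folds of Source B
def pvMODc : Int := 2305843009213693951

def pvLineHash (s : String) : Int :=
  s.toList.foldl (fun h c => PySem.Int.mod (h * 131 + ((c.toNat : Int) + 1)) pvMODc) 0

def pvHashFold (a : Int) (l : List Int) : Int :=
  l.foldl (fun h x => PySem.Int.mod (h * 1000003 + x) pvMODc) a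

-- the inner 'for j in range(m)' uniform-offset verification loop with its early breaks
def pvBOffsets (whole part wstrip : List String) (i : Nat) : List Nat → Option String → Option (Option String)
  | [], add => some add
  | j :: js, add =>
    if wstrip.getD (i + j) "" ≠ "" then
      let w := whole.getD (i + j) ""
      let cand := PySem.Str.slice w none
        (some (PySem.Str.len w - PySem.Str.len (part.getD j "")))
      match add with
      | none => pvBOffsets whole part wstrip i js (some cand)
      | some a => if cand = a then pvBOffsets whole part wstrip i js (some a) else none
    else pvBOffsets whole part wstrip i js add

-- the Rabin-Karp scan: verify only when the rolling hash h equals hp, then roll h forward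
def pvBScan (whole part repl wstrip pstrip : List String) (wh : List Int) (hp pw : Int) (m n : Nat) : List Int → Int → Option String
  | [], _ => none
  | i :: is, h =>
    if h = hp ∧ PySem.List.slice wstrip (some i) (some (i + (m : Int))) = pstrip then
      match pvBOffsets whole part wstrip i.toNat (List.range m) none with
      | some (some add) => some (PySem.Str.join ""
          (PySem.List.slice whole none (some i) ++ pvAddLead add repl ++
            PySem.List.slice whole (some (i + (m : Int))) none))
      | _ => pvBScan whole part repl wstrip pstrip wh hp pw m n is
          (if i.toNat + m < n then
            PySem.Int.mod ((h - wh.getD i.toNat 0 * pw) * 1000003 + wh.getD (i.toNat + m) 0) pvMODc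
          else h)
    else pvBScan whole part repl wstrip pstrip wh hp pw m n is
          (if i.toNat + m < n then
            PySem.Int.mod ((h - wh.getD i.toNat 0 * pw) * 1000003 + wh.getD (i.toNat + m) 0) pvMODc
          else h)

def replace_part_with_missing_leading_whitespace_alt (whole_lines : List String) (part_lines : List String) (replace_lines : List String) : Option String :=
  let lead := PySem.List.minD (pvLeadVals (part_lines ++ replace_lines)) (fun x => x) 0
  let part := if 0 < lead then pvOutdent lead part_lines else part_lines
  let repl := if 0 < lead then pvOutdent lead replace_lines else replace_lines
  let m := part.length
  let n := whole_lines.length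
  if m = 0 ∨ n < m then none
  else
    let pstrip := part.map (fun p => PySem.Str.lstrip p)
    let wstrip := whole_lines.map (fun w => PySem.Str.lstrip w)
    let wh := wstrip.map pvLineHash
    let hp := pvHashFold 0 (pstrip.map pvLineHash)
    let pw := PySem.Int.powMod 1000003 (m - 1) pvMODc
    pvBScan whole_lines part repl wstrip pstrip wh hp pw m n
      (PySem.List.pyRange 0 ((n : Int) - (m : Int) + 1) 1) (pvHashFold 0 (wh.take m))

-- ===== PRECONDITION & SPEC =====
def Spec_replace_part_with_missing_leading_whitespace (whole_lines : List String) (part_lines : List String) (replace_lines : List String) (out : Option String) : Prop := out = replace_part_with_missing_leading_whitespace_alt whole_lines part_lines replace_lines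
instance (whole_lines : List String) (part_lines : List String) (replace_lines : List String) (out : Option String) : Decidable (Spec_replace_part_with_missing_leading_whitespace whole_lines part_lines replace_lines out) := by unfold Spec_replace_part_with_missing_leading_whitespace; infer_instance

-- ===== CLAIM (what is proved, stated in full; the proofs are below) =====
def Claim_equal_replace_part_with_missing_leading_whitespace : Prop := ∀ (whole_lines : List String) (part_lines : List String) (replace_lines : List String), Dom_replace_part_with_missing_leading_whitespace whole_lines part_lines replace_lines → Spec_replace_part_with_missing_leading_whitespace whole_lines part_lines replace_lines (replace_part_with_missing_leading_whitespace whole_lines part_lines replace_lines)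

-- ===== LEMMAS AND PROOFS =====

-- abstract form of B's uniform-offset accumulator
def pvAgree : Option String → List String → Option (Option String)
  | add, [] => some add
  | none, c :: cs => pvAgree (some c) cs
  | some a, c :: cs => if c = a then pvAgree (some a) cs else none

-- the unreduced polynomial value behind pvHashFold
def pvPoly (a : Int) (l : List Int) : Int := l.foldl (fun h x => h * 1000003 + x) a

theorem pvLeadVals_append (xs ys : List String) :
    pvLeadVals (xs ++ ys) = pvLeadVals xs ++ pvLeadVals ys := by
  simp [pvLeadVals, List.filter_append]

theorem pvLeadVals_nonneg (ls : List String) : ∀ x ∈ pvLeadVals ls, 0 ≤ x := by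
  intro x hx
  simp only [pvLeadVals, List.mem_map, List.mem_filter] at hx
  obtain ⟨p, -, rfl⟩ := hx
  have h := List.length_dropWhile_le PySem.Chars.isspace p.toList
  simp only [PySem.Str.len, PySem.Str.toList_lstrip, PySem.Chars.lstrip]
  omega

theorem pvMinD_pos_iff (L : List Int) (h : ∀ x ∈ L, 0 ≤ x) :
    (L ≠ [] ∧ PySem.List.minD L (fun x => x) 0 ≠ 0) ↔ 0 < PySem.List.minD L (fun x => x) 0 := by
  unfold PySem.List.minD
  cases hm : PySem.List.min? L (fun x => x) with
  | none =>
    have hnil : L = [] := (PySem.List.min?_eq_none_iff L _).mp hm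
    simp [hnil]
  | some m =>
    have hmem : m ∈ L := PySem.List.min?_mem hm
    have hne : L ≠ [] := by rintro rfl; simp at hmem
    have h0 : 0 ≤ m := h m hmem
    simp only [Option.getD_some, hne, ne_eq, not_false_eq_true, true_and]
    omega

theorem pvDropWhile_append_ne (p : Char → Bool) (xs : List Char) (c : Char) (hc : p c = false) :
    List.dropWhile p (xs ++ [c]) ≠ [] := by
  induction xs with
  | nil => simp [hc]
  | cons a t ih =>
    by_cases h : p a
    · simpa [h] using ih
    · simp [h]

theorem pvDropWhile_head_false (p : Char → Bool) (l : List Char) (c : Char) (t : List Char)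
    (h : List.dropWhile p l = c :: t) : p c = false := by
  induction l with
  | nil => simp at h
  | cons a r ih =>
    by_cases hpa : p a
    · rw [List.dropWhile_cons, if_pos hpa] at h
      exact ih h
    · rw [List.dropWhile_cons, if_neg hpa] at h
      injection h with h1 h2
      subst h1
      simpa using hpa

theorem pvStripNil_iff (cs : List Char) : PySem.Chars.strip cs = [] ↔ PySem.Chars.lstrip cs = [] := by
  constructor
  · intro h
    cases hl : PySem.Chars.lstrip cs with
    | nil => rfl
    | cons c t =>
      exfalso
      have hc : PySem.Chars.isspace c = false :=
        pvDropWhile_head_false PySem.Chars.isspace cs c t hl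
      have : PySem.Chars.strip cs ≠ [] := by
        unfold PySem.Chars.strip PySem.Chars.rstrip
        rw [hl]
        simp only [List.reverse_cons]
        intro hcon
        exact pvDropWhile_append_ne PySem.Chars.isspace t.reverse c hc
          (by simpa using hcon)
      exact this h
  · intro h
    unfold PySem.Chars.strip PySem.Chars.rstrip
    rw [h]
    rfl

theorem pvBlank_iff (s : String) : PySem.Str.strip s ≠ "" ↔ PySem.Str.lstrip s ≠ "" := by
  have key : PySem.Str.strip s = "" ↔ PySem.Str.lstrip s = "" := by
    rw [← String.toList_eq_nil_iff, ← String.toList_eq_nil_iff,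
        PySem.Str.toList_strip, PySem.Str.toList_lstrip]
    exact pvStripNil_iff s.toList
  exact not_congr key

theorem pvBOffsets_eq_agree (whole part wstrip : List String) (k : Nat) (js : List Nat) (add : Option String) :
    pvBOffsets whole part wstrip k js add =
      pvAgree add ((js.filter (fun j => wstrip.getD (k + j) "" ≠ "")).map
        (fun j => PySem.Str.slice (whole.getD (k + j) "") none
          (some (PySem.Str.len (whole.getD (k + j) "") - PySem.Str.len (part.getD j ""))))) := by
  induction js generalizing add with
  | nil => cases add <;> rfl
  | cons j js ih =>
    by_cases hb : wstrip.getD (k + j) "" ≠ ""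
    · have hf : List.filter (fun j => decide (wstrip.getD (k + j) "" ≠ "")) (j :: js) =
          j :: List.filter (fun j => decide (wstrip.getD (k + j) "" ≠ "")) js := by
        rw [List.filter_cons, if_pos (by simpa using hb)]
      rw [hf, List.map_cons]
      cases add with
      | none =>
        simp only [pvBOffsets, if_pos hb]
        exact ih _
      | some a =>
        by_cases hc : PySem.Str.slice (whole.getD (k + j) "") none
            (some (PySem.Str.len (whole.getD (k + j) "") - PySem.Str.len (part.getD j ""))) = a
        · simp only [pvBOffsets, if_pos hb, if_pos hc]
          rw [ih]
          show _ = pvAgree (some a) _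
          simp only [pvAgree, if_pos hc]
        · simp only [pvBOffsets, if_pos hb, if_neg hc]
          show _ = pvAgree (some a) _
          simp only [pvAgree, if_neg hc]
    · have hf : List.filter (fun j => decide (wstrip.getD (k + j) "" ≠ "")) (j :: js) =
          List.filter (fun j => decide (wstrip.getD (k + j) "" ≠ "")) js := by
        rw [List.filter_cons, if_neg (by simpa using hb)]
      rw [hf]
      simp only [pvBOffsets, if_neg hb]
      exact ih add

theorem pvAgree_some (a : String) (cs : List String) :
    pvAgree (some a) cs = if cs.all (fun c => c = a) then some (some a) else none := by
  induction cs with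
  | nil => rfl
  | cons c cs ih =>
    by_cases h : c = a
    · subst h
      simp [pvAgree, ih]
    · simp [pvAgree, h]

theorem pvSet_singleton_iff (cs : List String) :
    (if (PySem.Set.ofList cs).length = 1 then (PySem.Set.ofList cs)[0]? else none) =
      (match pvAgree none cs with
       | some (some a) => some a
       | _ => none) := by
  cases cs with
  | nil => rfl
  | cons c cs =>
    rw [show pvAgree none (c :: cs) = pvAgree (some c) cs from rfl, pvAgree_some]
    by_cases hall : ∀ x ∈ cs, x = c
    · have hd : (PySem.Set.ofList cs).discard c = [] := by
        rw [List.eq_nil_iff_forall_not_mem]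
        intro y hy
        rw [PySem.Set.mem_discard] at hy
        exact hy.2 (hall y ((PySem.Set.mem_ofList cs y).mp hy.1))
      have hone : PySem.Set.ofList (c :: cs) = [c] := by
        rw [PySem.Set.ofList_cons, hd]
      have hb : cs.all (fun x => decide (x = c)) = true := by
        simp only [List.all_eq_true, decide_eq_true_eq]
        exact hall
      rw [hone, hb]
      rfl
    · obtain ⟨d, hd, hne⟩ : ∃ d, d ∈ cs ∧ d ≠ c := by
        rcases not_forall.mp hall with ⟨d, hd⟩
        exact ⟨d, by tauto, by tauto⟩
      have hmem : d ∈ (PySem.Set.ofList cs).discard c :=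
        (PySem.Set.mem_discard _ _ _).mpr ⟨(PySem.Set.mem_ofList cs d).mpr hd, hne⟩
      have hlen : (PySem.Set.ofList (c :: cs)).length ≠ 1 := by
        rw [PySem.Set.ofList_cons]
        intro hcon
        have : (PySem.Set.ofList cs).discard c = [] := by
          have := List.length_cons (as := (PySem.Set.ofList cs).discard c) (a := c)
          rw [List.eq_nil_iff_forall_not_mem]
          intro y hy
          have hpos : 0 < ((PySem.Set.ofList cs).discard c).length := List.length_pos_of_mem hy
          omega
        rw [this] at hmem
        simp at hmem
      have hb : cs.all (fun x => decide (x = c)) = false := by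
        simp only [List.all_eq_false]
        exact ⟨d, hd, by simpa using hne⟩
      rw [if_neg hlen, hb]
      rfl

-- the window lemma: A's per-window helper equals B's verification guarded by the slice test
theorem pvWindow_eq (whole part : List String) (k m' : Nat)
    (hm : part.length = m' + 1) (hkm : k + (m' + 1) ≤ whole.length) :
    pvMatchLead (PySem.List.slice whole (some (k : Int)) (some ((k : Int) + ((m' + 1 : Nat) : Int)))) part =
      (if PySem.List.slice (whole.map (fun w => PySem.Str.lstrip w)) (some (k : Int)) (some ((k : Int) + ((m' + 1 : Nat) : Int))) =
            part.map (fun p => PySem.Str.lstrip p) then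
        (match pvBOffsets whole part (whole.map (fun w => PySem.Str.lstrip w)) k (List.range (m' + 1)) none with
         | some (some a) => some a
         | _ => none)
       else none) := by
  set m := m' + 1 with hmdef
  have hcast : (k : Int) + ((m : Nat) : Int) = ((k + m : Nat) : Int) := by push_cast; ring
  set W := PySem.List.slice whole (some (k : Int)) (some ((k : Int) + ((m : Nat) : Int))) with hWdef
  have hW : W = List.take m (List.drop k whole) := by
    rw [hWdef, hcast, PySem.List.slice_natCast]
    congr 1
    omega
  have hWlen : W.length = m := by
    rw [hW]
    simp only [List.length_take, List.length_drop]
    omega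
  have hWget : ∀ j, j < m → W.getD j "" = whole.getD (k + j) "" := by
    intro j hj
    rw [hW, List.getD_eq_getElem?_getD, List.getD_eq_getElem?_getD]
    congr 1
    rw [List.getElem?_take_of_lt hj, List.getElem?_drop]
  set ws := whole.map (fun w => PySem.Str.lstrip w) with hws
  set ps := part.map (fun p => PySem.Str.lstrip p) with hps
  have hwslen : ws.length = whole.length := by rw [hws]; simp
  have hpslen : ps.length = m := by rw [hps]; simp [hm]
  have hwsget : ∀ i, i < whole.length → ws.getD i "" = PySem.Str.lstrip (whole.getD i "") := by
    intro i hi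
    rw [hws, List.getD_eq_getElem?_getD, List.getD_eq_getElem?_getD, List.getElem?_map,
        List.getElem?_eq_getElem hi]
    rfl
  have hpsget : ∀ j, j < m → ps.getD j "" = PySem.Str.lstrip (part.getD j "") := by
    intro j hj
    rw [hps, List.getD_eq_getElem?_getD, List.getD_eq_getElem?_getD, List.getElem?_map,
        List.getElem?_eq_getElem (by omega : j < part.length)]
    rfl
  -- the pointwise condition both sides are equivalent to
  set P : Prop := ∀ j, j < m → PySem.Str.lstrip (whole.getD (k + j) "") = PySem.Str.lstrip (part.getD j "") with hP
  have hcondA : ((List.range W.length).all (fun i =>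
      decide (PySem.Str.lstrip (W.getD i "") = PySem.Str.lstrip (part.getD i ""))) = true) ↔ P := by
    rw [hWlen]
    simp only [List.all_eq_true, List.mem_range, decide_eq_true_eq, hP]
    constructor
    · intro h j hj
      have := h j hj
      rwa [hWget j hj] at this
    · intro h j hj
      rw [hWget j hj]
      exact h j hj
  have hQ : (List.take m (List.drop k ws) = ps) ↔ P := by
    constructor
    · intro h j hj
      have hj2 : j < (List.take m (List.drop k ws)).length := by
        simp only [List.length_take, List.length_drop]
        omega
      have := congrArg (fun l => l[j]?) h
      simp only [List.getElem?_take_of_lt hj, List.getElem?_drop] at this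
      have hkj : k + j < whole.length := by omega
      rw [← hwsget (k + j) hkj, ← hpsget j hj]
      rw [List.getD_eq_getElem?_getD, List.getD_eq_getElem?_getD, this]
    · intro h
      apply List.ext_getElem
      · simp only [List.length_take, List.length_drop]
        omega
      · intro j hj1 hj2
        have hjm : j < m := by
          simp only [List.length_take, List.length_drop] at hj1
          omega
        have hkj : k + j < whole.length := by omega
        have e1 : (List.take m (List.drop k ws))[j] = ws[k + j]'(by omega) := by
          simp [List.getElem_take, List.getElem_drop]
        have e2 : ws[k + j]'(by omega) = ws.getD (k + j) "" := by
          rw [List.getD_eq_getElem?_getD, List.getElem?_eq_getElem (by omega : k + j < ws.length)]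
          rfl
        have e3 : ps[j] = ps.getD j "" := by
          rw [List.getD_eq_getElem?_getD, List.getElem?_eq_getElem hj2]
          rfl
        rw [e1, e2, e3, hwsget (k + j) hkj, hpsget j hjm]
        exact h j hjm
  have hguard : (PySem.List.slice ws (some (k : Int)) (some ((k : Int) + ((m : Nat) : Int))) = ps) ↔ P := by
    rw [hcast, PySem.List.slice_natCast, show (k + m - k) = m by omega]
    exact hQ
  -- candidate lists agree
  have hcands : ((List.range W.length).filter (fun i => decide (PySem.Str.strip (W.getD i "") ≠ ""))).map
        (fun i => PySem.Str.slice (W.getD i "") none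
          (some (PySem.Str.len (W.getD i "") - PySem.Str.len (part.getD i "")))) =
      ((List.range m).filter (fun j => ws.getD (k + j) "" ≠ "")).map
        (fun j => PySem.Str.slice (whole.getD (k + j) "") none
          (some (PySem.Str.len (whole.getD (k + j) "") - PySem.Str.len (part.getD j "")))) := by
    rw [hWlen]
    rw [List.filter_congr (fun j hj => ?_)]
    · apply List.map_congr_left
      intro j hj
      have hjm : j < m := List.mem_range.mp (List.mem_filter.mp hj).1
      rw [hWget j hjm]
    · have hjm : j < m := List.mem_range.mp hj
      rw [hWget j hjm]
      have hkj : k + j < whole.length := by omega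
      rw [hwsget (k + j) hkj]
      exact decide_eq_decide.mpr (pvBlank_iff (whole.getD (k + j) ""))
  -- assemble
  rw [pvBOffsets_eq_agree]
  simp only [pvMatchLead]
  by_cases hA : ((List.range W.length).all (fun i =>
      decide (PySem.Str.lstrip (W.getD i "") = PySem.Str.lstrip (part.getD i ""))) = true)
  · rw [if_pos hA, if_pos (hguard.mpr (hcondA.mp hA))]
    rw [hcands]
    exact pvSet_singleton_iff _
  · rw [if_neg hA, if_neg (fun hg => hA (hcondA.mpr (hguard.mp hg)))]

-- ===== hash arithmetic =====

theorem pvMODc_pos : (0 : Int) < pvMODc := by unfold pvMODc; norm_num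

theorem pvMod_eq_emod (a : Int) : PySem.Int.mod a pvMODc = a % pvMODc :=
  PySem.Int.mod_eq_emod_of_pos pvMODc_pos

theorem pvHashFold_eq_poly (l : List Int) (a : Int) :
    pvHashFold (PySem.Int.mod a pvMODc) l = PySem.Int.mod (pvPoly a l) pvMODc := by
  induction l generalizing a with
  | nil => rfl
  | cons x l ih =>
    show pvHashFold (PySem.Int.mod (PySem.Int.mod a pvMODc * 1000003 + x) pvMODc) l =
      PySem.Int.mod (pvPoly (a * 1000003 + x) l) pvMODc
    have hcongr : PySem.Int.mod (PySem.Int.mod a pvMODc * 1000003 + x) pvMODc =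
        PySem.Int.mod (a * 1000003 + x) pvMODc := by
      simp only [pvMod_eq_emod]
      conv_lhs => rw [Int.add_emod, Int.mul_emod, Int.emod_emod_of_dvd a dvd_rfl]
      conv_rhs => rw [Int.add_emod, Int.mul_emod]
    rw [hcongr, ih]

theorem pvHashFold_zero (l : List Int) :
    pvHashFold 0 l = PySem.Int.mod (pvPoly 0 l) pvMODc := by
  have h0 : PySem.Int.mod 0 pvMODc = 0 := by rw [pvMod_eq_emod]; simp
  rw [← h0, pvHashFold_eq_poly, h0]

theorem pvPoly_shift (l : List Int) (a : Int) :
    pvPoly a l = a * 1000003 ^ l.length + pvPoly 0 l := by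
  induction l generalizing a with
  | nil => simp [pvPoly]
  | cons x l ih =>
    show pvPoly (a * 1000003 + x) l = a * 1000003 ^ (l.length + 1) + pvPoly (0 * 1000003 + x) l
    rw [ih (a * 1000003 + x), ih (0 * 1000003 + x)]
    ring

theorem pvPoly_append_singleton (l : List Int) (z : Int) :
    pvPoly 0 (l ++ [z]) = pvPoly 0 l * 1000003 + z := by
  unfold pvPoly
  rw [List.foldl_append]
  rfl

theorem pvPowMod_eq (e : Nat) :
    PySem.Int.powMod 1000003 e pvMODc = PySem.Int.mod (1000003 ^ e) pvMODc :=
  PySem.Int.powMod_eq 1000003 e pvMODc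

-- rolling the hash one step forward keeps the window-hash invariant
theorem pvRoll (wh : List Int) (k m' : Nat) (hk : k + (m' + 1) < wh.length) :
    pvHashFold 0 ((wh.drop (k + 1)).take (m' + 1)) =
      PySem.Int.mod ((pvHashFold 0 ((wh.drop k).take (m' + 1)) -
        wh.getD k 0 * PySem.Int.powMod 1000003 m' pvMODc) * 1000003 +
        wh.getD (k + (m' + 1)) 0) pvMODc := by
  have hklt : k < wh.length := by omega
  have hz : k + 1 + m' < wh.length := by omega
  set a : Int := wh[k]'hklt with ha
  set t : List Int := (wh.drop (k + 1)).take m' with ht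
  set z : Int := wh[k + 1 + m']'hz with hzdef
  have htlen : t.length = m' := by
    rw [ht]
    simp only [List.length_take, List.length_drop]
    omega
  have hgk : wh.getD k 0 = a := by
    rw [List.getD_eq_getElem?_getD, List.getElem?_eq_getElem hklt]; rfl
  have hgz : wh.getD (k + (m' + 1)) 0 = z := by
    rw [List.getD_eq_getElem?_getD, show k + (m' + 1) = k + 1 + m' by omega,
      List.getElem?_eq_getElem hz]; rfl
  have hwin1 : (wh.drop k).take (m' + 1) = a :: t := by
    rw [List.drop_eq_getElem_cons hklt, List.take_succ_cons, ht]
  have hwin2 : (wh.drop (k + 1)).take (m' + 1) = t ++ [z] := by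
    rw [List.take_add_one, ht]
    congr 1
    rw [List.getElem?_drop, List.getElem?_eq_getElem hz]
    rfl
  rw [hwin1, hwin2, hgk, hgz, pvHashFold_zero, pvHashFold_zero, pvPowMod_eq,
    pvPoly_append_singleton]
  have hcons : pvPoly 0 (a :: t) = a * 1000003 ^ m' + pvPoly 0 t := by
    show pvPoly (0 * 1000003 + a) t = _
    rw [pvPoly_shift t (0 * 1000003 + a), htlen]
    ring
  simp only [pvMod_eq_emod]
  have hmodeq : (((pvPoly 0 (a :: t) % pvMODc - a * (1000003 ^ m' % pvMODc)) * 1000003 + z) % pvMODc)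
      = (((pvPoly 0 (a :: t) - a * 1000003 ^ m') * 1000003 + z) % pvMODc) :=
    Int.ModEq.add_right z (Int.ModEq.mul_right 1000003
      (Int.ModEq.sub (Int.emod_emod_of_dvd _ dvd_rfl) (Int.ModEq.mul_left a (Int.emod_emod_of_dvd _ dvd_rfl))))
  rw [hmodeq]
  congr 1
  rw [hcons]
  ring

-- the main scan equivalence, by downward induction over the remaining indices
theorem pvScan_eq (whole part repl : List String) (m' : Nat) (hm : part.length = m' + 1) :
    ∀ (d k : Nat) (h : Int), k + (m' + 1) + d = whole.length + 1 →
      k + (m' + 1) ≤ whole.length →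
      h = pvHashFold 0 ((((whole.map (fun w => PySem.Str.lstrip w)).map pvLineHash).drop k).take (m' + 1)) →
      pvALoop whole part repl ((m' + 1 : Nat) : Int)
          (PySem.List.pyRange (k : Int) ((whole.length : Int) - ((m' + 1 : Nat) : Int) + 1) 1) =
        pvBScan whole part repl (whole.map (fun w => PySem.Str.lstrip w)) (part.map (fun p => PySem.Str.lstrip p))
          ((whole.map (fun w => PySem.Str.lstrip w)).map pvLineHash)
          (pvHashFold 0 ((part.map (fun p => PySem.Str.lstrip p)).map pvLineHash))
          (PySem.Int.powMod 1000003 m' pvMODc) (m' + 1) whole.length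
          (PySem.List.pyRange (k : Int) ((whole.length : Int) - ((m' + 1 : Nat) : Int) + 1) 1) h := by
  intro d
  induction d with
  | zero => intro k h hd hk hinv; omega
  | succ d ih =>
    intro k h hd hk hinv
    set n := whole.length with hn
    set ws := whole.map (fun w => PySem.Str.lstrip w) with hws
    set ps := part.map (fun p => PySem.Str.lstrip p) with hps
    set wh := ws.map pvLineHash with hwh
    have hwhlen : wh.length = n := by simp [hwh, hws, hn]
    have hlt : (k : Int) < (n : Int) - ((m' + 1 : Nat) : Int) + 1 := by push_cast; omega
    rw [PySem.List.pyRange_one_cons hlt]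
    -- the next-h value B computes
    set h' : Int := (if k + (m' + 1) < n then
        PySem.Int.mod ((h - wh.getD k 0 * PySem.Int.powMod 1000003 m' pvMODc) * 1000003 +
          wh.getD (k + (m' + 1)) 0) pvMODc
      else h) with hh'
    have htail : pvALoop whole part repl ((m' + 1 : Nat) : Int)
          (PySem.List.pyRange ((k : Int) + 1) ((n : Int) - ((m' + 1 : Nat) : Int) + 1) 1) =
        pvBScan whole part repl ws ps wh
          (pvHashFold 0 (ps.map pvLineHash)) (PySem.Int.powMod 1000003 m' pvMODc) (m' + 1) n
          (PySem.List.pyRange ((k : Int) + 1) ((n : Int) - ((m' + 1 : Nat) : Int) + 1) 1) h' := by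
      by_cases hnext : k + 1 + (m' + 1) ≤ n
      · have hcast1 : ((k : Int) + 1) = ((k + 1 : Nat) : Int) := by push_cast; ring
        rw [hcast1]
        apply ih (k + 1) h' (by omega) hnext
        rw [hh', if_pos (by omega)]
        rw [hinv]
        exact (pvRoll wh k m' (by omega)).symm
      · have hnil : PySem.List.pyRange ((k : Int) + 1) ((n : Int) - ((m' + 1 : Nat) : Int) + 1) 1 = [] := by
          apply PySem.List.pyRange_one_eq_nil
          push_cast
          omega
        rw [hnil]
        rfl
    -- head step
    have hhead := pvWindow_eq whole part k m' hm hk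
    by_cases hsl : PySem.List.slice ws (some (k : Int)) (some ((k : Int) + ((m' + 1 : Nat) : Int))) = ps
    · -- hash agrees automatically
      have hhp : h = pvHashFold 0 (ps.map pvLineHash) := by
        have hslice : PySem.List.slice ws (some (k : Int)) (some ((k : Int) + ((m' + 1 : Nat) : Int))) =
            (ws.drop k).take (m' + 1) := by
          rw [show (k : Int) + ((m' + 1 : Nat) : Int) = ((k + (m' + 1) : Nat) : Int) by push_cast; ring,
            PySem.List.slice_natCast, show k + (m' + 1) - k = m' + 1 by omega]
        have h2 : List.take (m' + 1) (List.drop k wh) = List.map pvLineHash ps := by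
          rw [hwh, ← List.map_drop, ← List.map_take, ← hslice, hsl]
        rw [hinv, h2]
      show (match pvMatchLead (PySem.List.slice whole (some (k : Int)) (some ((k : Int) + ((m' + 1 : Nat) : Int)))) part with
        | some add => some (PySem.Str.join ""
            (PySem.List.slice whole none (some (k : Int)) ++ pvAddLead add repl ++
              PySem.List.slice whole (some ((k : Int) + ((m' + 1 : Nat) : Int))) none))
        | none => pvALoop whole part repl ((m' + 1 : Nat) : Int)
            (PySem.List.pyRange ((k : Int) + 1) ((n : Int) - ((m' + 1 : Nat) : Int) + 1) 1)) = _
      rw [hhead, if_pos hsl]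
      show _ = (if h = pvHashFold 0 (ps.map pvLineHash) ∧
          PySem.List.slice ws (some (k : Int)) (some ((k : Int) + ((m' + 1 : Nat) : Int))) = ps then _ else _)
      rw [if_pos ⟨hhp, hsl⟩]
      simp only [Int.toNat_natCast]
      cases hoff : pvBOffsets whole part ws k (List.range (m' + 1)) none with
      | none => exact htail
      | some o =>
        cases o with
        | none => exact htail
        | some add => rfl
    · show (match pvMatchLead (PySem.List.slice whole (some (k : Int)) (some ((k : Int) + ((m' + 1 : Nat) : Int)))) part with
        | some add => some (PySem.Str.join ""
            (PySem.List.slice whole none (some (k : Int)) ++ pvAddLead add repl ++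
              PySem.List.slice whole (some ((k : Int) + ((m' + 1 : Nat) : Int))) none))
        | none => pvALoop whole part repl ((m' + 1 : Nat) : Int)
            (PySem.List.pyRange ((k : Int) + 1) ((n : Int) - ((m' + 1 : Nat) : Int) + 1) 1)) = _
      rw [hhead, if_neg hsl]
      show _ = (if h = pvHashFold 0 (ps.map pvLineHash) ∧
          PySem.List.slice ws (some (k : Int)) (some ((k : Int) + ((m' + 1 : Nat) : Int))) = ps then _ else _)
      rw [if_neg (fun hc => hsl hc.2)]
      simp only [Int.toNat_natCast]
      exact htail

theorem pvALoop_nil_part (whole repl : List String) (idxs : List Int)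
    (hidx : ∀ i ∈ idxs, 0 ≤ i) :
    pvALoop whole [] repl 0 idxs = none := by
  induction idxs with
  | nil => rfl
  | cons i is ih =>
    have h0 : 0 ≤ i := hidx i (List.mem_cons_self)
    obtain ⟨kk, rfl⟩ : ∃ kk : Nat, i = (kk : Int) := ⟨i.toNat, (Int.toNat_of_nonneg h0).symm⟩
    have hW : PySem.List.slice whole (some ((kk : Nat) : Int)) (some (((kk : Nat) : Int) + 0)) = [] := by
      rw [add_zero, PySem.List.slice_natCast]
      simp
    simp only [pvALoop, hW]
    rw [show pvMatchLead ([] : List String) [] = none from rfl]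
    exact ih (fun j hj => hidx j (List.mem_cons_of_mem _ hj))

theorem pvMain_loop (whole part repl : List String) :
    pvALoop whole part repl (PySem.List.len part)
      (PySem.List.pyRange 0 (PySem.List.len whole - PySem.List.len part + 1) 1) =
    (if part.length = 0 ∨ whole.length < part.length then none
     else
      pvBScan whole part repl (whole.map (fun w => PySem.Str.lstrip w)) (part.map (fun p => PySem.Str.lstrip p))
        ((whole.map (fun w => PySem.Str.lstrip w)).map pvLineHash)
        (pvHashFold 0 ((part.map (fun p => PySem.Str.lstrip p)).map pvLineHash))
        (PySem.Int.powMod 1000003 (part.length - 1) pvMODc) part.length whole.length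
        (PySem.List.pyRange 0 ((whole.length : Int) - (part.length : Int) + 1) 1)
        (pvHashFold 0 ((((whole.map (fun w => PySem.Str.lstrip w)).map pvLineHash)).take part.length))) := by
  by_cases hm0 : part.length = 0
  · rw [if_pos (Or.inl hm0)]
    have hnil : part = [] := List.length_eq_zero_iff.mp hm0
    subst hnil
    simp only [PySem.List.len_eq, List.length_nil, Nat.cast_zero]
    apply pvALoop_nil_part
    intro i hi
    exact (PySem.List.mem_pyRange_one.mp hi).1
  · obtain ⟨m', hm⟩ : ∃ m', part.length = m' + 1 := ⟨part.length - 1, by omega⟩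
    by_cases hnm : whole.length < part.length
    · rw [if_pos (Or.inr hnm)]
      have hnil : PySem.List.pyRange 0 (PySem.List.len whole - PySem.List.len part + 1) 1 = [] := by
        apply PySem.List.pyRange_one_eq_nil
        simp only [PySem.List.len_eq]
        omega
      rw [hnil]
      rfl
    · rw [if_neg (not_or.mpr ⟨hm0, by omega⟩)]
      simp only [PySem.List.len_eq, hm, Nat.add_sub_cancel]
      have hmain := pvScan_eq whole part repl m' hm (whole.length + 1 - (m' + 1)) 0
        (pvHashFold 0 ((((whole.map (fun w => PySem.Str.lstrip w)).map pvLineHash)).take (m' + 1)))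
        (by omega) (by omega) (by rw [List.drop_zero])
      rw [Nat.cast_zero] at hmain
      exact hmain

-- ===== VERDICT (by name: the statement is the Claim_ definition above) =====
theorem replace_part_with_missing_leading_whitespace_spec : Claim_equal_replace_part_with_missing_leading_whitespace := by
  intro whole_lines part_lines replace_lines _dom
  unfold Spec_replace_part_with_missing_leading_whitespace
  simp only [replace_part_with_missing_leading_whitespace,
    replace_part_with_missing_leading_whitespace_alt]
  rw [pvLeadVals_append]
  have hnn : ∀ x ∈ pvLeadVals part_lines ++ pvLeadVals replace_lines, 0 ≤ x := by
    intro x hx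
    rcases List.mem_append.mp hx with h | h
    · exact pvLeadVals_nonneg part_lines x h
    · exact pvLeadVals_nonneg replace_lines x h
  have hiff := pvMinD_pos_iff (pvLeadVals part_lines ++ pvLeadVals replace_lines) hnn
  by_cases hc : 0 < PySem.List.minD (pvLeadVals part_lines ++ pvLeadVals replace_lines) (fun x => x) 0
  · rw [if_pos (hiff.mpr hc), if_pos (hiff.mpr hc), if_pos hc, if_pos hc]
    exact pvMain_loop whole_lines _ _
  · rw [if_neg (fun h => hc (hiff.mp h)), if_neg (fun h => hc (hiff.mp h)), if_neg hc, if_neg hc]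
    exact pvMain_loop whole_lines _ _
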